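-- pv_equiv track=rewrite | github.com/Dusk145/PTIT---Python | ICPC0114 - PERFECT PRIME.py | sum_digit
-- ===== SOURCE A (Python) =====
-- def sum_digit(n):
--     s = str(n)
--     S = 0
--     for i in s:
--         if i == "2" or i == "3" or i == "5" or i == "7":
--             S += int(i)
--             continue
--         return 0
--     return S
-- ===== SOURCE B (Python) =====
-- def sum_digit(n):
--     if n <= 0:
--         return 0
--     S = 0
--     while n > 0:
--         n, d = divmod(n, 10)
--         if d not in (2, 3, 5, 7):
--             return 0
--         S += d
--     return S
-- ===== Notes on version B (the rewrite author's own statement) =====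
-- stated objective: alternative
-- what changed: Drops the string conversion entirely: B extracts digits arithmetically with divmod(n, 10) in a while loop (negatives and 0 rejected by a sign test up front), instead of A's scan over the characters of str(n).
import Mathlib
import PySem

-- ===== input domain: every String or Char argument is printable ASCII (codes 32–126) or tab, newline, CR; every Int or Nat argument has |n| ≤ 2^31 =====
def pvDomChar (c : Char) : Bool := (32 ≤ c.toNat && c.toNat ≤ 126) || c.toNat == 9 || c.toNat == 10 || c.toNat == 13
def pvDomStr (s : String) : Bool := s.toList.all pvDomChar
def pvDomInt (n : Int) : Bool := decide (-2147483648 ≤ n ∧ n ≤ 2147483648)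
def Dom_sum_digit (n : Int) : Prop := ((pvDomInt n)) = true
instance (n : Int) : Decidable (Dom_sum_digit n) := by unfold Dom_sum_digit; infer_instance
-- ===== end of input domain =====

-- B drops A's string conversion and extracts digits arithmetically with divmod(n, 10); objective: alternative.

-- ===== PORT A =====
-- A's loop over str(n) with early return 0; int(i) is exact via PySem.Int.ofChars?.
def sumDigitLoopA : List Char → Int → Int
  | [], S => S
  | c :: rest, S =>
      if c = '2' ∨ c = '3' ∨ c = '5' ∨ c = '7' then
        sumDigitLoopA rest (S + (PySem.Int.ofChars? [c]).getD 0)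
      else 0

def sum_digit (n : Int) : Int := sumDigitLoopA (PySem.Int.toChars n) 0

-- ===== PORT B =====
-- B's while loop: n, d = divmod(n, 10); early return 0 on a non-prime digit.
def sumDigitLoopB (n : Int) (S : Int) : Int :=
  if h : 0 < n then
    let q := PySem.Int.floordiv n 10
    let d := PySem.Int.mod n 10
    if d = 2 ∨ d = 3 ∨ d = 5 ∨ d = 7 then sumDigitLoopB q (S + d) else 0
  else S
termination_by n.toNat
decreasing_by
  have h1 : PySem.Int.floordiv n 10 = n / 10 := PySem.Int.floordiv_eq_ediv_of_pos (by omega)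
  simp only [h1]
  omega

def sum_digit_alt (n : Int) : Int := if n ≤ 0 then 0 else sumDigitLoopB n 0

-- ===== PRECONDITION & SPEC =====
def Spec_sum_digit (n : Int) (out : Int) : Prop := out = sum_digit_alt n
instance (n : Int) (out : Int) : Decidable (Spec_sum_digit n out) := by unfold Spec_sum_digit; infer_instance

-- ===== CLAIM (what is proved, stated in full; the proofs are below) =====
def Claim_equal_sum_digit : Prop := ∀ (n : Int), Dom_sum_digit n → Spec_sum_digit n (sum_digit n)

-- ===== LEMMAS AND PROOFS =====

-- the decimal digit characters of a natural number, most significant first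
def digitsChars (n : Nat) : List Char :=
  if h : n / 10 = 0 then [Nat.digitChar (n % 10)]
  else digitsChars (n / 10) ++ [Nat.digitChar (n % 10)]
termination_by n
decreasing_by omega

def primeC (c : Char) : Bool := c == '2' || c == '3' || c == '5' || c == '7'
def valC (c : Char) : Int := (PySem.Int.ofChars? [c]).getD 0

theorem digitsChars_small {n : Nat} (h : n / 10 = 0) :
    digitsChars n = [Nat.digitChar (n % 10)] := by
  rw [digitsChars, dif_pos h]

theorem digitsChars_big {n : Nat} (h : ¬ n / 10 = 0) :
    digitsChars n = digitsChars (n / 10) ++ [Nat.digitChar (n % 10)] := by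
  rw [digitsChars, dif_neg h]

theorem digit_prime_iff (d : Nat) (h : d < 10) :
    primeC (Nat.digitChar d) = true ↔ (d = 2 ∨ d = 3 ∨ d = 5 ∨ d = 7) := by
  interval_cases d <;> decide

theorem digit_val (d : Nat) (h : d < 10) : valC (Nat.digitChar d) = (d : Int) := by
  interval_cases d <;> decide

theorem toDigitsCore_eq (fuel : Nat) : ∀ (n : Nat) (ds : List Char), n < fuel →
    Nat.toDigitsCore 10 fuel n ds = digitsChars n ++ ds := by
  induction fuel with
  | zero => intro n ds h; omega
  | succ k ih =>
    intro n ds h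
    rw [Nat.toDigitsCore]
    by_cases h0 : n / 10 = 0
    · simp only [h0, if_pos]
      rw [digitsChars_small h0]
      simp
    · rw [if_neg h0, ih (n / 10) _ (by omega), digitsChars_big h0]
      simp

theorem toDigits_eq (n : Nat) : Nat.toDigits 10 n = digitsChars n := by
  have := toDigitsCore_eq (n + 1) n [] (by omega)
  simpa [Nat.toDigits] using this

theorem sumDigitLoopA_eq (cs : List Char) (S : Int) :
    sumDigitLoopA cs S =
      if cs.all primeC then S + (cs.map valC).sum else 0 := by
  induction cs generalizing S with
  | nil => simp [sumDigitLoopA]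
  | cons c rest ih =>
    simp only [sumDigitLoopA, List.all_cons, List.map_cons, List.sum_cons]
    by_cases h : c = '2' ∨ c = '3' ∨ c = '5' ∨ c = '7'
    · rw [if_pos h, ih]
      have hp : primeC c = true := by
        rcases h with h | h | h | h <;> simp [primeC, h]
      simp [hp, valC, add_assoc]
    · rw [if_neg h]
      have h2 := h
      rw [not_or, not_or, not_or] at h2
      obtain ⟨h1, h3, h5, h7⟩ := h2
      have hp : primeC c = false := by simp [primeC, h1, h3, h5, h7]
      simp [hp]

theorem sumDigitLoopB_eq (k : Nat) : ∀ (n S : Int), 0 < n → n.toNat ≤ k →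
    sumDigitLoopB n S =
      if (digitsChars n.toNat).all primeC then S + ((digitsChars n.toNat).map valC).sum else 0 := by
  induction k with
  | zero => intro n S hn hk; omega
  | succ k ih =>
    intro n S hn hk
    have hcast : n = ((n.toNat : Nat) : Int) := by omega
    set m := n.toNat with hm
    rw [sumDigitLoopB, dif_pos hn]
    have hq : PySem.Int.floordiv n 10 = ((m / 10 : Nat) : Int) := by
      rw [hcast]; exact PySem.Int.floordiv_natCast m 10
    have hd : PySem.Int.mod n 10 = ((m % 10 : Nat) : Int) := by
      rw [hcast]; exact PySem.Int.mod_natCast m 10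
    simp only [hq, hd]
    have hdlt : m % 10 < 10 := by omega
    by_cases hp : m % 10 = 2 ∨ m % 10 = 3 ∨ m % 10 = 5 ∨ m % 10 = 7
    · have hpI : ((m % 10 : Nat) : Int) = 2 ∨ ((m % 10 : Nat) : Int) = 3 ∨
          ((m % 10 : Nat) : Int) = 5 ∨ ((m % 10 : Nat) : Int) = 7 := by omega
      rw [if_pos hpI]
      have hpc : primeC (Nat.digitChar (m % 10)) = true := (digit_prime_iff _ hdlt).mpr hp
      by_cases h0 : m / 10 = 0
      · -- last digit: recursive call at 0 returns the accumulator
        rw [sumDigitLoopB]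
        rw [dif_neg (by omega : ¬ (0:Int) < ((m / 10 : Nat) : Int))]
        rw [digitsChars_small h0]
        simp [hpc, digit_val _ hdlt]
      · have hq0 : (0 : Int) < ((m / 10 : Nat) : Int) := by omega
        have hqn : ((m / 10 : Nat) : Int).toNat = m / 10 := by omega
        rw [ih _ _ hq0 (by omega)]
        rw [hqn, digitsChars_big h0]
        simp only [List.all_append, List.map_append, List.sum_append, List.all_cons,
          List.all_nil, List.map_cons, List.map_nil, List.sum_cons, List.sum_nil,
          hpc, Bool.and_true, add_zero]
        rw [digit_val _ hdlt]
        split <;> ring_nf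
    · have hpI : ¬ (((m % 10 : Nat) : Int) = 2 ∨ ((m % 10 : Nat) : Int) = 3 ∨
          ((m % 10 : Nat) : Int) = 5 ∨ ((m % 10 : Nat) : Int) = 7) := by omega
      rw [if_neg hpI]
      have hpc : primeC (Nat.digitChar (m % 10)) = false := by
        rcases Bool.eq_false_or_eq_true (primeC (Nat.digitChar (m % 10))) with hb | hb
        · exact absurd ((digit_prime_iff _ hdlt).mp hb) hp
        · exact hb
      by_cases h0 : m / 10 = 0
      · rw [digitsChars_small h0]; simp [hpc]
      · rw [digitsChars_big h0]; simp [hpc]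

-- ===== VERDICT (by name: the statement is the Claim_ definition above) =====
theorem sum_digit_spec : Claim_equal_sum_digit := by
  intro n _
  unfold Spec_sum_digit sum_digit sum_digit_alt
  by_cases hn : n ≤ 0
  · rw [if_pos hn]
    by_cases hneg : n < 0
    · simp only [PySem.Int.toChars, if_pos hneg]
      rw [sumDigitLoopA]
      rw [if_neg (by decide : ¬ ('-' = '2' ∨ '-' = '3' ∨ '-' = '5' ∨ '-' = '7'))]
    · have h0 : n = 0 := by omega
      subst h0
      decide
  · rw [if_neg hn]
    have hpos : 0 < n := by omega
    simp only [PySem.Int.toChars, if_neg (by omega : ¬ n < 0)]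
    rw [toDigits_eq, sumDigitLoopA_eq, sumDigitLoopB_eq n.toNat n 0 hpos (le_refl _)]
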